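-- pv_equiv track=rewrite | github.com/BeardyMike/Advent-of-Code | 2022/Day 7/Part1.py | partone
-- ===== SOURCE A (Python) =====
-- import itertools
--
-- def partone(s, bool):
--     part2=bool
--     dir, sizes = [], []
--     for line in s.splitlines():
--         if line == '$ cd ..':
--             size = dir.pop()
--             sizes.append(size)
--             dir[-1] += size
--         elif line.startswith('$ cd '):
--             dir.append(0)
--         elif line[0].isdigit():
--             dir[-1] += int(line.split()[0])
--     sizes.extend(itertools.accumulate(dir[::-1]))
--     if part2:
--         return min(s for s in sizes if s >= max(sizes) - 40000000)
--     else: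
--         return sum(s for s in sizes if s <= 100000)
-- ===== SOURCE B (Python) =====
-- def partone(s, bool):
--     # Two staged passes with prefix sums: a directory's size is the difference of
--     # the file-size prefix sums at its close and open points, so no running totals
--     # are folded into parents and no accumulate tail is needed.
--     lines = s.splitlines()
--     pref = [0]
--     for line in lines:
--         pref.append(pref[-1] + (int(line.split()[0]) if line[0].isdigit() else 0))
--     sizes, open_idx = [], []
--     for i, line in enumerate(lines):
--         if line == '$ cd ..':
--             j = open_idx.pop()
--             sizes.append(pref[i] - pref[j])
--         elif line.startswith('$ cd '):
--             open_idx.append(i)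
--     sizes.extend(pref[len(lines)] - pref[j] for j in reversed(open_idx))
--     if bool:
--         need = max(sizes) - 40000000
--         return min(x for x in sizes if x >= need)
--     return sum(x for x in sizes if x <= 100000)
-- ===== Notes on version B (the rewrite author's own statement) =====
-- stated objective: alternative
-- what changed: B computes each directory size as a difference of two entries of a precomputed prefix-sum table of file sizes (stack of open line indices), instead of A's running-total stack that pops each child's size into its parent and finishes with itertools.accumulate over the leftover stack.
import Mathlib
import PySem

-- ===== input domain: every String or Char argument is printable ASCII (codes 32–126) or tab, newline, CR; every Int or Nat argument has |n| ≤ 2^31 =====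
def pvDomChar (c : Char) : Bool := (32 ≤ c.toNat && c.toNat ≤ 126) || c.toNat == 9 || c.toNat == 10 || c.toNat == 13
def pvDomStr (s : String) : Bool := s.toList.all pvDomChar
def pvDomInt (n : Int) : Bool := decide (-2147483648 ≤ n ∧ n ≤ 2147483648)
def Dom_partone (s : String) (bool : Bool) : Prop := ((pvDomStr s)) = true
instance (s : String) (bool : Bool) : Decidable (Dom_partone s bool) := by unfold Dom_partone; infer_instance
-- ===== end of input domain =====

-- B replaces A's running-total stack (pop child size into parent, accumulate the leftover
-- stack) by two staged passes: a prefix-sum table of the file sizes plus a stack of OPEN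
-- INDICES, each directory size being a difference of two prefix sums (alternative decomposition).

-- ===== PORT A =====

-- dir[-1] += v  (Python raises IndexError on []; that input is excluded by Pre_)
def pvAddLast : List Int → Int → List Int
  | [], _ => []
  | [x], v => [x + v]
  | x :: y :: xs, v => x :: pvAddLast (y :: xs) v

-- itertools.accumulate (running sums), ported by hand; exact for Int addition
def pvAccumulate : Int → List Int → List Int
  | _, [] => []
  | acc, x :: xs => (acc + x) :: pvAccumulate (acc + x) xs

def paStep (st : List Int × List Int) (line : String) : List Int × List Int :=
  if line == "$ cd .." then
    match PySem.List.pop? st.1 with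
    | some (size, dir') => (pvAddLast dir' size, st.2 ++ [size])
    | none => st          -- Python: IndexError (pop from empty list); excluded by Pre_
  else if PySem.Str.startswith line "$ cd " then (st.1 ++ [0], st.2)
  else
    match PySem.Str.pyGet? line 0 with
    | some c =>
      if PySem.Chars.isdigit c then
        match PySem.Int.ofStr? ((PySem.Str.split₀ line).headD "") with
        | some v => (pvAddLast st.1 v, st.2)
        | none => st      -- Python: ValueError from int(); excluded by Pre_
      else st
    | none => st          -- Python: IndexError on empty line; excluded by Pre_

def partone (s : String) (bool : Bool) : Int :=
  let st := (PySem.Str.splitlines s).foldl paStep ([], [])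
  let sizes := st.2 ++ pvAccumulate 0 ((PySem.List.slice? st.1 none none (-1)).getD [])
  if bool then
    match PySem.List.max? sizes (fun x => x) with
    | some m =>
      match PySem.List.min? (sizes.filter (fun x => decide (m - 40000000 ≤ x))) (fun x => x) with
      | some r => r
      | none => 0         -- unreachable: max itself satisfies the filter
    | none => 0           -- Python: ValueError, max of empty sequence; excluded by Pre_
  else (sizes.filter (fun x => decide (x ≤ 100000))).sum

-- ===== PORT B =====

-- (int(line.split()[0]) if line[0].isdigit() else 0); the two 0-defaults stand where
-- Python raises IndexError (empty line) / ValueError (bad int) — both excluded by Pre_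
def pbFileVal (line : String) : Int :=
  match PySem.Str.pyGet? line 0 with
  | some c =>
    if PySem.Chars.isdigit c then
      match PySem.Int.ofStr? ((PySem.Str.split₀ line).headD "") with
      | some v => v
      | none => 0
    else 0
  | none => 0

-- pass 1: pref[k] = total size of the file lines among the first k lines
def pbPref (lines : List String) : List Int :=
  lines.foldl (fun p line => p ++ [(PySem.List.pyGet? p (-1)).getD 0 + pbFileVal line]) [0]

-- pass 2 body: state = (sizes, open_idx); on a pop, size = pref[i] - pref[j]
def pbStep2 (pref : List Int) (st : List Int × List Int) (il : Int × String) : List Int × List Int :=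
  if il.2 == "$ cd .." then
    match PySem.List.pop? st.2 with
    | some (j, rest) =>
        (st.1 ++ [(PySem.List.pyGet? pref il.1).getD 0 - (PySem.List.pyGet? pref j).getD 0], rest)
    | none => st          -- Python: IndexError (pop from empty list); excluded by Pre_
  else if PySem.Str.startswith il.2 "$ cd " then (st.1, st.2 ++ [il.1])
  else st

def partone_alt (s : String) (bool : Bool) : Int :=
  let lines := PySem.Str.splitlines s
  let pref := pbPref lines
  let st := (PySem.List.enumerate lines).foldl (pbStep2 pref) ([], [])
  let pn := (PySem.List.pyGet? pref (lines.length : Int)).getD 0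
  let sizes := st.1 ++ st.2.reverse.map (fun j => pn - (PySem.List.pyGet? pref j).getD 0)
  if bool then
    match PySem.List.max? sizes (fun x => x) with
    | some m =>
      let need := m - 40000000
      match PySem.List.min? (sizes.filter (fun x => decide (need ≤ x))) (fun x => x) with
      | some r => r
      | none => 0
    | none => 0
  else (sizes.filter (fun x => decide (x ≤ 100000))).sum

-- ===== PRECONDITION & SPEC =====

def pvIsPop (l : String) : Bool := l == "$ cd .."
def pvIsPush (l : String) : Bool := !(l == "$ cd ..") && PySem.Str.startswith l "$ cd "
def pvIsFile (l : String) : Bool :=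
  !(l == "$ cd ..") && !(PySem.Str.startswith l "$ cd ") &&
  (match PySem.Str.pyGet? l 0 with | some c => PySem.Chars.isdigit c | none => false)
def pvDepth (ls : List String) : Int :=
  (ls.countP (fun l => pvIsPush l) : Int) - (ls.countP (fun l => pvIsPop l) : Int)

-- Pre_ excludes exactly the inputs where the Python A raises: an empty line (IndexError on
-- line[0]), a '$ cd ..' with fewer than two directories open (IndexError on pop / dir[-1]),
-- a digit-led line with no directory open (IndexError on dir[-1]) or whose first token is
-- not a valid int literal (ValueError), and bool=True with no '$ cd' line at all
-- (ValueError: max of an empty sequence).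
def Pre_partone (s : String) (bool : Bool) : Prop :=
  (∀ i ∈ List.range (PySem.Str.splitlines s).length,
      ((PySem.Str.splitlines s).getD i "") ≠ "" ∧
      (pvIsPop ((PySem.Str.splitlines s).getD i "") = true →
        2 ≤ pvDepth ((PySem.Str.splitlines s).take i)) ∧
      (pvIsFile ((PySem.Str.splitlines s).getD i "") = true →
        1 ≤ pvDepth ((PySem.Str.splitlines s).take i) ∧
        (PySem.Int.ofStr? ((PySem.Str.split₀
            ((PySem.Str.splitlines s).getD i "")).headD "")).isSome = true)) ∧
  (bool = true → (PySem.Str.splitlines s).any pvIsPush = true)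

instance (s : String) (bool : Bool) : Decidable (Pre_partone s bool) := by
  unfold Pre_partone; infer_instance

def pvWitness_partone : String × Bool := ("$ cd /\n100 a.txt", false)

def Spec_partone (s : String) (bool : Bool) (out : Int) : Prop := out = partone_alt s bool
instance (s : String) (bool : Bool) (out : Int) : Decidable (Spec_partone s bool out) := by
  unfold Spec_partone; infer_instance

-- ===== CLAIM (what is proved, stated in full; the proofs are below) =====
def Claim_equal_partone : Prop :=
  ∀ (s : String) (bool : Bool), Dom_partone s bool → Pre_partone s bool →
    Spec_partone s bool (partone s bool)

-- ===== LEMMAS AND PROOFS =====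

-- P i = pref[i] (B's prefix-sum table, looked up the way port B looks it up)
def pvP (lines : List String) (i : Int) : Int :=
  (PySem.List.pyGet? (pbPref lines) i).getD 0

-- A's stack reconstructed from B's open-index stack: consecutive differences of P,
-- the top entry closed off at "time" k
def pvDir (P : Int → Int) (k : Int) : List Int → List Int
  | [] => []
  | [j] => [P k - P j]
  | j :: j' :: r => (P j' - P j) :: pvDir P k (j' :: r)

-- suffix sums: what pvAccumulate of the reversed stack produces, un-reversed
def pvSufs : List Int → List Int
  | [] => []
  | x :: xs => (x + xs.sum) :: pvSufs xs

theorem pbPref_go (lines : List String) : ∀ (ys : List Int) (a : Int),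
    lines.foldl (fun p line => p ++ [(PySem.List.pyGet? p (-1)).getD 0 + pbFileVal line]) (ys ++ [a])
      = (ys ++ [a]) ++ pvAccumulate a (lines.map pbFileVal) := by
  induction lines with
  | nil => intro ys a; simp [pvAccumulate]
  | cons l ls ih =>
    intro ys a
    simp only [List.foldl_cons, List.map_cons, pvAccumulate]
    rw [PySem.List.pyGet?_neg_one_append_singleton]
    simp only [Option.getD_some]
    have := ih (ys ++ [a]) (a + pbFileVal l)
    rw [List.append_assoc] at this ⊢
    rw [this]
    simp

theorem pbPref_eq (lines : List String) :
    pbPref lines = [0] ++ pvAccumulate 0 (lines.map pbFileVal) := by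
  have := pbPref_go lines [] 0
  simpa [pbPref] using this

theorem pvAccumulate_getElem? (xs : List Int) : ∀ (a : Int) (i : Nat), i < xs.length →
    (pvAccumulate a xs)[i]? = some (a + (xs.take (i + 1)).sum) := by
  induction xs with
  | nil => intro a i h; simp at h
  | cons x xs ih =>
    intro a i h
    cases i with
    | zero => simp [pvAccumulate]
    | succ i =>
      simp only [pvAccumulate, List.getElem?_cons_succ, List.take_succ_cons, List.sum_cons]
      rw [ih (a + x) i (by simpa using h)]
      congr 1
      ring

theorem pvP_natCast (lines : List String) (k : Nat) (hk : k ≤ lines.length) :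
    pvP lines (k : Int) = ((lines.map pbFileVal).take k).sum := by
  unfold pvP
  rw [pbPref_eq, PySem.List.pyGet?_natCast]
  cases k with
  | zero => simp
  | succ i =>
    simp only [List.singleton_append, List.getElem?_cons_succ]
    rw [pvAccumulate_getElem? _ 0 i (by simpa using hk)]
    simp

theorem pvP_step (lines : List String) (k : Nat) (hk : k < lines.length) :
    pvP lines ((k : Int) + 1) = pvP lines (k : Int) + pbFileVal lines[k] := by
  have h1 : ((k : Int) + 1) = ((k + 1 : Nat) : Int) := by push_cast; ring
  rw [h1, pvP_natCast lines (k + 1) (by omega), pvP_natCast lines k (by omega)]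
  rw [List.take_add_one]
  simp [hk]

theorem pbFileVal_cdup : pbFileVal "$ cd .." = 0 := by decide

theorem pbFileVal_of_startswith (l : String) (h : PySem.Str.startswith l "$ cd " = true) :
    pbFileVal l = 0 := by
  have hpre : "$ cd ".toList <+: l.toList := by
    have := PySem.Chars.startswith_iff (s := l.toList) (p := "$ cd ".toList)
    simp only [PySem.Str.startswith] at h
    exact this.mp (by simpa using h)
  obtain ⟨t, ht⟩ := hpre
  have hget : PySem.Str.pyGet? l 0 = some '$' := by
    simp only [PySem.Str.pyGet?_eq, PySem.Chars.pyGet?_eq_listPyGet?]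
    rw [← ht, PySem.List.pyGet?_zero, List.getElem?_append_left (by decide)]
    decide
  unfold pbFileVal
  rw [hget]
  simp [PySem.Chars.isdigit]

theorem pvDir_concat (P : Int → Int) (k : Int) (idx : List Int) (j : Int) :
    pvDir P k (idx ++ [j]) = pvDir P j idx ++ [P k - P j] := by
  induction idx with
  | nil => rfl
  | cons j0 idx' ih =>
    cases idx' with
    | nil => simp [pvDir]
    | cons j1 r =>
      simp only [List.cons_append] at ih
      simp only [List.cons_append, pvDir]
      rw [ih]

theorem pvDir_congr (P : Int → Int) (k1 k2 : Int) (h : P k1 = P k2) (idx : List Int) :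
    pvDir P k1 idx = pvDir P k2 idx := by
  induction idx with
  | nil => rfl
  | cons j r ih =>
    cases r with
    | nil => simp [pvDir, h]
    | cons j1 r' => simp only [pvDir] at ih ⊢; rw [ih]

theorem pvAddLast_concat (ys : List Int) (a v : Int) :
    pvAddLast (ys ++ [a]) v = ys ++ [a + v] := by
  induction ys with
  | nil => rfl
  | cons y ys ih =>
    cases ys with
    | nil => rfl
    | cons z zs => simp only [List.cons_append, pvAddLast] at ih ⊢; rw [ih]

theorem pvDir_sum (P : Int → Int) (k : Int) (j : Int) (r : List Int) :
    (pvDir P k (j :: r)).sum = P k - P j := by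
  induction r generalizing j with
  | nil => simp [pvDir]
  | cons j1 r' ih => simp only [pvDir, List.sum_cons, ih]; ring

theorem pvSufs_pvDir (P : Int → Int) (k : Int) (idx : List Int) :
    pvSufs (pvDir P k idx) = idx.map (fun j => P k - P j) := by
  induction idx with
  | nil => rfl
  | cons j r ih =>
    cases r with
    | nil => simp [pvDir, pvSufs]
    | cons j1 r' =>
      simp only [pvDir, pvSufs, List.map_cons] at ih ⊢
      rw [ih, pvDir_sum]
      congr 1
      ring

theorem pvAccumulate_append (l : List Int) (a y : Int) :
    pvAccumulate a (l ++ [y]) = pvAccumulate a l ++ [a + l.sum + y] := by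
  induction l generalizing a with
  | nil => simp [pvAccumulate]
  | cons z l ih =>
    simp only [List.cons_append, pvAccumulate, ih, List.sum_cons, List.cons_append]
    congr 3
    ring

theorem pvAccumulate_reverse (dir : List Int) :
    pvAccumulate 0 dir.reverse = (pvSufs dir).reverse := by
  induction dir with
  | nil => rfl
  | cons x xs ih =>
    simp only [List.reverse_cons, pvAccumulate_append, ih, pvSufs, List.reverse_cons,
      List.sum_reverse]
    congr 2
    ring

theorem pbFileVal_none (l : String) (hg : PySem.Str.pyGet? l 0 = none) :
    pbFileVal l = 0 := by
  unfold pbFileVal; rw [hg]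

theorem pbFileVal_some (l : String) (c : Char) (hg : PySem.Str.pyGet? l 0 = some c) :
    pbFileVal l = if PySem.Chars.isdigit c = true then
        (match PySem.Int.ofStr? ((PySem.Str.split₀ l).headD "") with
         | some v => v | none => 0)
      else 0 := by
  unfold pbFileVal; rw [hg]

theorem pvAddLast_pvDir (P : Int → Int) (k k' v : Int) (hP : P k' = P k + v)
    (idx : List Int) : pvAddLast (pvDir P k idx) v = pvDir P k' idx := by
  rcases List.eq_nil_or_concat idx with rfl | ⟨idx', j, rfl⟩
  · rfl
  · simp only [List.concat_eq_append, pvDir_concat, pvAddLast_concat]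
    congr 2
    rw [hP]
    ring

theorem fold_sim (lines : List String) : ∀ (rest : List String) (k : Nat),
    k ≤ lines.length → rest = lines.drop k → ∀ (idx sizes : List Int),
    rest.foldl paStep (pvDir (pvP lines) (k : Int) idx, sizes)
      = (pvDir (pvP lines) (lines.length : Int)
           ((PySem.List.enumerate rest (k : Int)).foldl (pbStep2 (pbPref lines)) (sizes, idx)).2,
         ((PySem.List.enumerate rest (k : Int)).foldl (pbStep2 (pbPref lines)) (sizes, idx)).1) := by
  intro rest
  induction rest with
  | nil =>
    intro k hk hrest idx sizes
    have hkn : k = lines.length := by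
      have := List.drop_eq_nil_iff.mp hrest.symm
      omega
    subst hkn
    simp [PySem.List.enumerate_nil]
  | cons l rest' ih =>
    intro k hk hrest idx sizes
    have hklt : k < lines.length := by
      by_contra hge
      have : lines.drop k = [] := List.drop_eq_nil_iff.mpr (by omega)
      rw [this] at hrest
      exact (List.cons_ne_nil l rest') hrest
    have hdec := List.drop_eq_getElem_cons hklt
    rw [hdec] at hrest
    obtain ⟨hl, hrest'⟩ : l = lines[k] ∧ rest' = lines.drop (k + 1) := by
      exact ⟨(List.cons.injEq _ _ _ _ ▸ hrest).1, (List.cons.injEq _ _ _ _ ▸ hrest).2⟩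
    have hcast : ((k : Int) + 1) = ((k + 1 : Nat) : Int) := by push_cast; ring
    rw [PySem.List.enumerate_cons, List.foldl_cons, List.foldl_cons]
    by_cases hpop : (l == "$ cd ..") = true
    · -- '$ cd ..' : pop
      have hleq : l = "$ cd .." := eq_of_beq hpop
      have hP : pvP lines ((k : Int) + 1) = pvP lines (k : Int) := by
        rw [pvP_step lines k hklt, ← hl, hleq, pbFileVal_cdup, add_zero]
      rcases List.eq_nil_or_concat idx with rfl | ⟨idx', j, rfl⟩
      · have hstep : paStep (pvDir (pvP lines) (k : Int) [], sizes) l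
            = (pvDir (pvP lines) ((k : Int) + 1) [], sizes) := by
          simp [paStep, hpop, PySem.List.pop?, pvDir]
        have hstep2 : pbStep2 (pbPref lines) (sizes, []) ((k : Int), l)
            = (sizes, []) := by
          simp [pbStep2, hpop, PySem.List.pop?]
        rw [hstep, hstep2, hcast]
        exact ih (k + 1) (by omega) hrest' [] sizes
      · simp only [List.concat_eq_append]
        have hstep : paStep (pvDir (pvP lines) (k : Int) (idx' ++ [j]), sizes) l
            = (pvDir (pvP lines) ((k : Int) + 1) idx',
               sizes ++ [pvP lines (k : Int) - pvP lines j]) := by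
          simp only [paStep, hpop, if_pos, pvDir_concat, PySem.List.pop?_last]
          congr 1
          exact pvAddLast_pvDir _ _ _ _ (by rw [hP]; ring) idx'
        have hstep2 : pbStep2 (pbPref lines) (sizes, idx' ++ [j]) ((k : Int), l)
            = (sizes ++ [pvP lines (k : Int) - pvP lines j], idx') := by
          simp only [pbStep2, hpop, if_pos, PySem.List.pop?_last]
          rfl
        rw [hstep, hstep2, hcast]
        exact ih (k + 1) (by omega) hrest' idx' _
    · simp only [paStep, pbStep2, hpop, Bool.false_eq_true, if_neg, not_false_eq_true]
      by_cases hpush : PySem.Str.startswith l "$ cd " = true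
      · -- '$ cd X' : push
        have hP : pvP lines ((k : Int) + 1) = pvP lines (k : Int) := by
          rw [pvP_step lines k hklt, ← hl, pbFileVal_of_startswith l hpush, add_zero]
        simp only [hpush, if_pos]
        have hdir : pvDir (pvP lines) (k : Int) idx ++ [0]
            = pvDir (pvP lines) ((k : Int) + 1) (idx ++ [(k : Int)]) := by
          rw [pvDir_concat, hP, sub_self]
        rw [hdir, hcast]
        exact ih (k + 1) (by omega) hrest' (idx ++ [(k : Int)]) sizes
      · simp only [hpush, Bool.false_eq_true, if_neg, not_false_eq_true]
        have hfin : ∀ (hP : pvP lines ((k : Int) + 1) = pvP lines (k : Int)),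
            rest'.foldl paStep (pvDir (pvP lines) (k : Int) idx, sizes)
              = (pvDir (pvP lines) (lines.length : Int)
                   ((PySem.List.enumerate rest' ((k : Int) + 1)).foldl
                     (pbStep2 (pbPref lines)) (sizes, idx)).2,
                 ((PySem.List.enumerate rest' ((k : Int) + 1)).foldl
                     (pbStep2 (pbPref lines)) (sizes, idx)).1) := by
          intro hP
          rw [pvDir_congr (pvP lines) (k : Int) ((k : Int) + 1) hP.symm idx, hcast]
          exact ih (k + 1) (by omega) hrest' idx sizes
        cases hg : PySem.Str.pyGet? l 0 with
        | none =>
          exact hfin (by rw [pvP_step lines k hklt, ← hl]; rw [pbFileVal_none l hg]; ring)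
        | some c =>
          by_cases hd : PySem.Chars.isdigit c = true
          · simp only [hd, if_pos]
            cases hv : PySem.Int.ofStr? ((PySem.Str.split₀ l).headD "") with
            | none =>
              exact hfin (by rw [pvP_step lines k hklt, ← hl]; rw [pbFileVal_some l c hg, if_pos hd, hv]; ring)
            | some v =>
              have hP : pvP lines ((k : Int) + 1) = pvP lines (k : Int) + v := by
                rw [pvP_step lines k hklt, ← hl]
                rw [pbFileVal_some l c hg, if_pos hd, hv]
              have hred : (match some v with
                  | some v => (pvAddLast (pvDir (pvP lines) (k : Int) idx) v, sizes)
                  | none => (pvDir (pvP lines) (k : Int) idx, sizes))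
                  = (pvAddLast (pvDir (pvP lines) (k : Int) idx) v, sizes) := rfl
              rw [hred, pvAddLast_pvDir (pvP lines) (k : Int) ((k : Int) + 1) v hP idx, hcast]
              exact ih (k + 1) (by omega) hrest' idx sizes
          · simp only [hd, Bool.false_eq_true, if_neg, not_false_eq_true]
            exact hfin (by rw [pvP_step lines k hklt, ← hl]; rw [pbFileVal_some l c hg, if_neg hd]; ring)

theorem pv_main (s : String) (bool : Bool) : partone s bool = partone_alt s bool := by
  have h' : (PySem.Str.splitlines s).foldl paStep ([], [])
      = (pvDir (pvP (PySem.Str.splitlines s)) ((PySem.Str.splitlines s).length : Int)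
           ((PySem.List.enumerate (PySem.Str.splitlines s) 0).foldl
             (pbStep2 (pbPref (PySem.Str.splitlines s))) ([], [])).2,
         ((PySem.List.enumerate (PySem.Str.splitlines s) 0).foldl
             (pbStep2 (pbPref (PySem.Str.splitlines s))) ([], [])).1) := by
    have h := fold_sim (PySem.Str.splitlines s) (PySem.Str.splitlines s) 0
      (by omega) (by simp) [] []
    simpa using h
  simp only [partone, partone_alt]
  rw [h']
  rw [PySem.List.slice?_none_none_neg_one, Option.getD_some, pvAccumulate_reverse,
    pvSufs_pvDir, ← List.map_reverse]
  rfl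

-- ===== VERDICT (by name: the statement is the Claim_ definition above) =====
theorem partone_spec : Claim_equal_partone := by
  intro s bool _ _
  unfold Spec_partone
  exact pv_main s bool
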